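-- pv_equiv track=rewrite | github.com/JoeWildfong/Umbrella-Planner | fixNames.py | toA1
-- ===== SOURCE A (Python) =====
-- def numberToLetter(number):
--   return chr(ord('A') + number)
--
-- def toA1(row, col):
--   smallest = col - 1
--   letter_portion = ""
--   letter_portion = numberToLetter(smallest % 26) + letter_portion
--   while smallest >= 26:
--     smallest = smallest // 26 - 1
--     letter_portion = numberToLetter(smallest % 26) + letter_portion
--   return letter_portion + str(row)
-- ===== SOURCE B (Python) =====
-- def toA1(row, col):
--   def letters(n):
--     if n < 26:
--       return chr(ord('A') + n % 26)
--     return letters(n // 26 - 1) + chr(ord('A') + n % 26)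
--   return letters(col - 1) + str(row)
-- ===== Notes on version B (the rewrite author's own statement) =====
-- stated objective: alternative
-- what changed: Replaces A's do-while loop that prepends letters into an accumulator with a recursion over the base-26 digits that appends the least-significant letter after the recursive call.
import Mathlib
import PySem

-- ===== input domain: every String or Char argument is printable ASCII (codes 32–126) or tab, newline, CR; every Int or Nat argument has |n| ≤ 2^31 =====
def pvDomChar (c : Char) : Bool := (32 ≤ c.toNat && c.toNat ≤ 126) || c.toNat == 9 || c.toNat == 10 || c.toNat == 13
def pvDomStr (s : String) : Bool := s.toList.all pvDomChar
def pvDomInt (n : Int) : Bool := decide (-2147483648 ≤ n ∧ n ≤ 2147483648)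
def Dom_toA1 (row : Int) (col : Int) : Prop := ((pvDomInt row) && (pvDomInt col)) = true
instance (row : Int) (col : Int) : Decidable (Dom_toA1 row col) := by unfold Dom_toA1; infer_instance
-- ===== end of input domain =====

-- B replaces A's letter-prepending while loop with a recursion over the base-26 digits (objective: alternative decomposition).

-- ===== PORT A =====
-- chr(ord('A') + number); argument is always n % 26 ∈ [0,25] here, so '.toNat' is exact
def numberToLetter (number : Int) : String := String.mk [Char.ofNat (65 + number).toNat]

-- the 'while smallest >= 26' loop, prepending one letter per iteration
def toA1Loop (smallest : Int) (letter_portion : String) : String :=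
  if _h : smallest ≥ 26 then
    toA1Loop (PySem.Int.floordiv smallest 26 - 1)
      (numberToLetter (PySem.Int.mod (PySem.Int.floordiv smallest 26 - 1) 26) ++ letter_portion)
  else letter_portion
termination_by smallest.toNat
decreasing_by
  have := PySem.Int.floordiv_eq_ediv_of_pos (a := smallest) (b := 26) (by omega)
  omega

def toA1 (row : Int) (col : Int) : String :=
  let smallest := col - 1
  let letter_portion : String := ""
  let letter_portion := numberToLetter (PySem.Int.mod smallest 26) ++ letter_portion
  toA1Loop smallest letter_portion ++ PySem.Int.toStr row

-- ===== PORT B =====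
def letters (n : Int) : String :=
  if n < 26 then String.mk [Char.ofNat (65 + PySem.Int.mod n 26).toNat]
  else letters (PySem.Int.floordiv n 26 - 1) ++ String.mk [Char.ofNat (65 + PySem.Int.mod n 26).toNat]
termination_by n.toNat
decreasing_by
  have := PySem.Int.floordiv_eq_ediv_of_pos (a := n) (b := 26) (by omega)
  omega

def toA1_alt (row : Int) (col : Int) : String := letters (col - 1) ++ PySem.Int.toStr row

-- ===== PRECONDITION & SPEC =====
def Spec_toA1 (row : Int) (col : Int) (out : String) : Prop := out = toA1_alt row col
instance (row : Int) (col : Int) (out : String) : Decidable (Spec_toA1 row col out) := by unfold Spec_toA1; infer_instance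

-- ===== CLAIM (what is proved, stated in full; the proofs are below) =====
def Claim_equal_toA1 : Prop := ∀ (row : Int) (col : Int), Dom_toA1 row col → Spec_toA1 row col (toA1 row col)

-- ===== LEMMAS AND PROOFS =====

theorem toA1Loop_letters (n : Int) (acc : String) :
    toA1Loop n (numberToLetter (PySem.Int.mod n 26) ++ acc) = letters n ++ acc := by
  induction n using letters.induct generalizing acc with
  | case1 n h =>
    rw [toA1Loop, letters]
    simp [numberToLetter, not_le.mpr h, h]
  | case2 n h ih =>
    rw [toA1Loop, letters]
    simp only [not_lt.mp h, ge_iff_le, dite_true, if_neg h]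
    rw [String.append_assoc] at *
    exact ih _

-- ===== VERDICT (by name: the statement is the Claim_ definition above) =====
theorem toA1_spec : Claim_equal_toA1 := by
  intro row col _
  unfold Spec_toA1 toA1 toA1_alt
  simpa using toA1Loop_letters (col - 1) ""
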